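-- pv_equiv track=rewrite | github.com/jgvhabets/lid_opm | ACC_analysis_bachelor/code/ACC_movement_detec.py | take_out_short_off_onset
-- ===== SOURCE A (Python) =====
-- def take_out_short_off_onset(onsets, offsets, min_time_period, sampling_frequency):
--     onsets_clean = onsets.copy()
--     offsets_clean = offsets.copy()
--     min_sample_period = min_time_period * sampling_frequency
--
--     if hasattr(onsets, 'tolist'):
--         onsets_clean = onsets.tolist()
--         offsets_clean = offsets.tolist()
--
--     # Iterate in reverse to safely delete items
--     for i in range(len(offsets) - 2, -1, -1):  # Start from the end
--         time_between = onsets[i + 1] - offsets[i]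
--         if time_between <= min_sample_period:
--             del onsets_clean[i + 1]
--             del offsets_clean[i]
--
--     return onsets_clean, offsets_clean
-- ===== SOURCE B (Python) =====
-- def take_out_short_off_onset(onsets, offsets, min_time_period, sampling_frequency):
--     if hasattr(onsets, 'tolist'):
--         onsets = onsets.tolist()
--         offsets = offsets.tolist()
--     thr = min_time_period * sampling_frequency
--     m = len(offsets)
--     # one pass over the original arrays: which off/onset gaps are too short
--     short = [onsets[i + 1] - offsets[i] <= thr for i in range(m - 1)]
--     onsets_clean = [x for j, x in enumerate(onsets) if not (1 <= j <= m - 1 and short[j - 1])]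
--     offsets_clean = [x for j, x in enumerate(offsets) if not (j <= m - 2 and short[j])]
--     return onsets_clean, offsets_clean
-- ===== Notes on version B (the rewrite author's own statement) =====
-- stated objective: alternative
-- what changed: Replaces A's reverse loop with repeated in-place deletions by a single pass that precomputes a boolean short-gap mask from the original arrays and rebuilds both lists with comprehensions.
import Mathlib
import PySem

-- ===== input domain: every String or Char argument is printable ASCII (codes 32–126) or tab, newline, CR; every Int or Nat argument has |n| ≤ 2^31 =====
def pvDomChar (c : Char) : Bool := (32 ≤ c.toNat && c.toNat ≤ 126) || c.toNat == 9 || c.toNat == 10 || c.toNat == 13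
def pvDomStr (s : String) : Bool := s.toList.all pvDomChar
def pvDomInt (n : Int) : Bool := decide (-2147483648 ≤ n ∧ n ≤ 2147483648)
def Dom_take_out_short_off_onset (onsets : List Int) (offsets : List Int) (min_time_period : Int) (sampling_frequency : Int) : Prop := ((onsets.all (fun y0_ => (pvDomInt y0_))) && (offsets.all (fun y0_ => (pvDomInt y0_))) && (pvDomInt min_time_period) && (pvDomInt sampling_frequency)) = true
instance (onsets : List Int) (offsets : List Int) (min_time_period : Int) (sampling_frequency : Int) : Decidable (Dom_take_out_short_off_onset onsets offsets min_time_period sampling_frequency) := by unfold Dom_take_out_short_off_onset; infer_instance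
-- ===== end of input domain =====

-- B replaces A's reverse loop with repeated in-place deletions by a single pass that builds a
-- short-gap mask from the original arrays and rebuilds both lists by comprehension (alternative
-- algorithm, same observed cost on the timed inputs).

-- ===== PORT A =====
-- 'del l[i]' for a nonnegative in-range index i (Pre_ keeps every deleted index in range)
def pvDelAt (l : List Int) (i : Nat) : List Int := l.take i ++ l.drop (i+1)

-- 'for i in range(len(offsets)-2, -1, -1)': fuel k+1 performs the iteration i = k, then recurses
def pvLoopA (onsets offsets : List Int) (thr : Int) : Nat → List Int × List Int → List Int × List Int
  | 0, st => st
  | k+1, st =>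
      let time_between := PySem.List.pyGetD onsets ((k : Int) + 1) 0 - PySem.List.pyGetD offsets (k : Int) 0
      pvLoopA onsets offsets thr k
        (if time_between ≤ thr then (pvDelAt st.1 (k+1), pvDelAt st.2 k) else st)

def take_out_short_off_onset (onsets : List Int) (offsets : List Int) (min_time_period : Int) (sampling_frequency : Int) : List Int × List Int :=
  let min_sample_period := min_time_period * sampling_frequency
  pvLoopA onsets offsets min_sample_period (offsets.length - 1) (onsets, offsets)

-- ===== PORT B =====
-- short = [onsets[i + 1] - offsets[i] <= thr for i in range(m - 1)]
def pvShort (onsets offsets : List Int) (thr : Int) : List Bool :=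
  (PySem.List.pyRange 0 ((offsets.length : Int) - 1) 1).map
    (fun i => decide (PySem.List.pyGetD onsets (i + 1) 0 - PySem.List.pyGetD offsets i 0 ≤ thr))

-- keep test for an onset (j, x): not (1 <= j <= m - 1 and short[j - 1])
def pvFOn (m : Int) (short : List Bool) (p : Int × Int) : Option Int :=
  if 1 ≤ p.1 ∧ p.1 ≤ m - 1 ∧ PySem.List.pyGetD short (p.1 - 1) false = true then none else some p.2

-- keep test for an offset (j, x): not (j <= m - 2 and short[j])
def pvFOff (m : Int) (short : List Bool) (p : Int × Int) : Option Int :=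
  if p.1 ≤ m - 2 ∧ PySem.List.pyGetD short p.1 false = true then none else some p.2

def take_out_short_off_onset_alt (onsets : List Int) (offsets : List Int) (min_time_period : Int) (sampling_frequency : Int) : List Int × List Int :=
  let thr := min_time_period * sampling_frequency
  let m : Int := offsets.length
  let short := pvShort onsets offsets thr
  ((PySem.List.enumerate onsets 0).filterMap (pvFOn m short),
   (PySem.List.enumerate offsets 0).filterMap (pvFOff m short))

-- ===== PRECONDITION & SPEC =====
-- Pre_ excludes exactly the inputs where A raises IndexError: len(offsets) ≥ 2 while onsets is
-- shorter than offsets (the loop reads onsets[i+1] past its end); B raises there as well.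
def Pre_take_out_short_off_onset (onsets : List Int) (offsets : List Int) (min_time_period : Int) (sampling_frequency : Int) : Prop :=
  offsets.length ≤ 1 ∨ offsets.length ≤ onsets.length
instance (onsets : List Int) (offsets : List Int) (min_time_period : Int) (sampling_frequency : Int) : Decidable (Pre_take_out_short_off_onset onsets offsets min_time_period sampling_frequency) := by unfold Pre_take_out_short_off_onset; infer_instance

def pvWitness_take_out_short_off_onset : List Int × List Int × Int × Int := ([0, 5, 100], [1, 6, 110], 2, 1)

def Spec_take_out_short_off_onset (onsets : List Int) (offsets : List Int) (min_time_period : Int) (sampling_frequency : Int) (out : List Int × List Int) : Prop := out = take_out_short_off_onset_alt onsets offsets min_time_period sampling_frequency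
instance (onsets : List Int) (offsets : List Int) (min_time_period : Int) (sampling_frequency : Int) (out : List Int × List Int) : Decidable (Spec_take_out_short_off_onset onsets offsets min_time_period sampling_frequency out) := by unfold Spec_take_out_short_off_onset; infer_instance

-- ===== CLAIM (what is proved, stated in full; the proofs are below) =====
def Claim_equal_take_out_short_off_onset : Prop := ∀ (onsets : List Int) (offsets : List Int) (min_time_period : Int) (sampling_frequency : Int), Dom_take_out_short_off_onset onsets offsets min_time_period sampling_frequency → Pre_take_out_short_off_onset onsets offsets min_time_period sampling_frequency → Spec_take_out_short_off_onset onsets offsets min_time_period sampling_frequency (take_out_short_off_onset onsets offsets min_time_period sampling_frequency)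

-- ===== LEMMAS AND PROOFS =====

-- the state A's loop holds once the iterations i = m-2 … k have run: an untouched prefix
-- followed by the already-filtered suffix
def pvSpecOn (onsets offsets : List Int) (thr : Int) (k : Nat) : List Int :=
  onsets.take (k+1) ++
    ((PySem.List.enumerate onsets 0).drop (k+1)).filterMap
      (pvFOn (offsets.length : Int) (pvShort onsets offsets thr))

def pvSpecOff (onsets offsets : List Int) (thr : Int) (k : Nat) : List Int :=
  offsets.take k ++
    ((PySem.List.enumerate offsets 0).drop k).filterMap
      (pvFOff (offsets.length : Int) (pvShort onsets offsets thr))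

lemma pvShort_get (onsets offsets : List Int) (thr : Int) (k : Nat)
    (hk : (k : Int) < (offsets.length : Int) - 1) :
    PySem.List.pyGetD (pvShort onsets offsets thr) (k : Int) false
      = decide (PySem.List.pyGetD onsets ((k : Int) + 1) 0 - PySem.List.pyGetD offsets (k : Int) 0 ≤ thr) := by
  unfold pvShort
  exact PySem.List.pyGetD_map_pyRange_of_nonneg _ _ _ _ (by positivity) hk

lemma pvEnum_drop (xs : List Int) (n : Nat) (h : n ≤ xs.length) :
    (PySem.List.enumerate xs 0).drop n = PySem.List.enumerate (xs.drop n) (n : Int) := by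
  conv_lhs => rw [← List.take_append_drop n xs]
  rw [PySem.List.enumerate_append]
  rw [List.drop_append_of_le_length (by simp [PySem.List.length_enumerate, h])]
  simp [PySem.List.length_enumerate, List.length_take, h]

lemma pvEnum_drop_cons (xs : List Int) (n : Nat) (h : n < xs.length) :
    (PySem.List.enumerate xs 0).drop n
      = ((n : Int), xs[n]) :: (PySem.List.enumerate xs 0).drop (n+1) := by
  rw [pvEnum_drop xs n h.le, pvEnum_drop xs (n+1) h, List.drop_eq_getElem_cons h,
      PySem.List.enumerate_cons]
  norm_num

-- short gap at i = k: deleting index k+1 / k turns the loop state for k+1 into the one for k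
lemma pvSpecOn_del (onsets offsets : List Int) (thr : Int) (k : Nat)
    (hm : k + 2 ≤ offsets.length) (hlen : offsets.length ≤ onsets.length)
    (hc : PySem.List.pyGetD onsets ((k : Int) + 1) 0 - PySem.List.pyGetD offsets (k : Int) 0 ≤ thr) :
    pvDelAt (pvSpecOn onsets offsets thr (k+1)) (k+1) = pvSpecOn onsets offsets thr k := by
  have hkon : k + 1 < onsets.length := by omega
  have hshort : PySem.List.pyGetD (pvShort onsets offsets thr) (k : Int) false = true := by
    rw [pvShort_get _ _ _ k (by omega)]; exact decide_eq_true hc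
  have hf : pvFOn (offsets.length : Int) (pvShort onsets offsets thr) (((k+1 : Nat) : Int), onsets[k+1]) = none := by
    unfold pvFOn
    rw [if_pos]
    refine ⟨by push_cast; omega, by push_cast; omega, ?_⟩
    have h1 : ((k+1 : Nat) : Int) - 1 = (k : Int) := by push_cast; ring
    rw [h1, hshort]
  unfold pvDelAt pvSpecOn
  rw [pvEnum_drop_cons onsets (k+1) hkon, List.filterMap_cons, hf]
  have hlt : (onsets.take (k+2)).length = k + 2 := by
    simp [List.length_take]; omega
  rw [List.take_append_of_le_length (by simp [List.length_take]; try omega),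
      List.drop_append_of_le_length (by simp [List.length_take]; try omega)]
  rw [List.take_take, List.drop_of_length_le (by simp [List.length_take]; try omega)]
  simp

lemma pvSpecOff_del (onsets offsets : List Int) (thr : Int) (k : Nat)
    (hm : k + 2 ≤ offsets.length)
    (hc : PySem.List.pyGetD onsets ((k : Int) + 1) 0 - PySem.List.pyGetD offsets (k : Int) 0 ≤ thr) :
    pvDelAt (pvSpecOff onsets offsets thr (k+1)) k = pvSpecOff onsets offsets thr k := by
  have hkoff : k < offsets.length := by omega
  have hshort : PySem.List.pyGetD (pvShort onsets offsets thr) (k : Int) false = true := by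
    rw [pvShort_get _ _ _ k (by omega)]; exact decide_eq_true hc
  have hg : pvFOff (offsets.length : Int) (pvShort onsets offsets thr) (((k : Nat) : Int), offsets[k]) = none := by
    unfold pvFOff
    rw [if_pos]
    exact ⟨by push_cast; omega, hshort⟩
  unfold pvDelAt pvSpecOff
  rw [pvEnum_drop_cons offsets k hkoff, List.filterMap_cons, hg]
  have hlt : (offsets.take (k+1)).length = k + 1 := by
    simp [List.length_take]; omega
  rw [List.take_append_of_le_length (by simp [List.length_take]; try omega),
      List.drop_append_of_le_length (by simp [List.length_take]; try omega)]
  rw [List.take_take, List.drop_of_length_le (by simp [List.length_take]; try omega)]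
  simp

-- long gap at i = k: no deletion, and the two loop states already coincide
lemma pvSpecOn_skip (onsets offsets : List Int) (thr : Int) (k : Nat)
    (hm : k + 2 ≤ offsets.length) (hlen : offsets.length ≤ onsets.length)
    (hc : ¬ PySem.List.pyGetD onsets ((k : Int) + 1) 0 - PySem.List.pyGetD offsets (k : Int) 0 ≤ thr) :
    pvSpecOn onsets offsets thr (k+1) = pvSpecOn onsets offsets thr k := by
  have hkon : k + 1 < onsets.length := by omega
  have hshort : PySem.List.pyGetD (pvShort onsets offsets thr) (k : Int) false = false := by
    rw [pvShort_get _ _ _ k (by omega)]; exact decide_eq_false hc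
  have hf : pvFOn (offsets.length : Int) (pvShort onsets offsets thr) (((k+1 : Nat) : Int), onsets[k+1]) = some onsets[k+1] := by
    unfold pvFOn
    rw [if_neg]
    rintro ⟨_, _, h3⟩
    have h1 : ((k+1 : Nat) : Int) - 1 = (k : Int) := by push_cast; ring
    rw [h1, hshort] at h3
    exact Bool.false_ne_true h3
  unfold pvSpecOn
  rw [pvEnum_drop_cons onsets (k+1) hkon, List.filterMap_cons, hf]
  have ht : onsets.take (k+1+1) = onsets.take (k+1) ++ [onsets[k+1]] := by
    rw [List.take_add_one, List.getElem?_eq_getElem hkon]; rfl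
  rw [ht, List.append_assoc]; rfl

lemma pvSpecOff_skip (onsets offsets : List Int) (thr : Int) (k : Nat)
    (hm : k + 2 ≤ offsets.length)
    (hc : ¬ PySem.List.pyGetD onsets ((k : Int) + 1) 0 - PySem.List.pyGetD offsets (k : Int) 0 ≤ thr) :
    pvSpecOff onsets offsets thr (k+1) = pvSpecOff onsets offsets thr k := by
  have hkoff : k < offsets.length := by omega
  have hshort : PySem.List.pyGetD (pvShort onsets offsets thr) (k : Int) false = false := by
    rw [pvShort_get _ _ _ k (by omega)]; exact decide_eq_false hc
  have hg : pvFOff (offsets.length : Int) (pvShort onsets offsets thr) (((k : Nat) : Int), offsets[k]) = some offsets[k] := by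
    unfold pvFOff
    rw [if_neg]
    rintro ⟨_, h2⟩
    rw [hshort] at h2
    exact Bool.false_ne_true h2
  unfold pvSpecOff
  rw [pvEnum_drop_cons offsets k hkoff, List.filterMap_cons, hg]
  have ht : offsets.take (k+1) = offsets.take k ++ [offsets[k]] := by
    rw [List.take_add_one, List.getElem?_eq_getElem hkoff]; rfl
  rw [ht, List.append_assoc]; rfl

lemma pvFilterMap_keep_all {f : Int × Int → Option Int} (l : List (Int × Int))
    (h : ∀ p ∈ l, f p = some p.2) : l.filterMap f = l.map (·.2) := by
  induction l with
  | nil => rfl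
  | cons a t ih => simp [h a (by simp), ih (fun p hp => h p (by simp [hp]))]

lemma pvFilterMap_enum_snd (xs : List Int) (s : Int) (f : Int × Int → Option Int)
    (h : ∀ p ∈ PySem.List.enumerate xs s, f p = some p.2) :
    (PySem.List.enumerate xs s).filterMap f = xs := by
  rw [pvFilterMap_keep_all _ h, PySem.List.map_snd_enumerate]

lemma pvLoopA_inv (onsets offsets : List Int) (thr : Int)
    (hlen : offsets.length ≤ onsets.length) :
    ∀ k : Nat, k + 1 ≤ offsets.length →
      pvLoopA onsets offsets thr k (pvSpecOn onsets offsets thr k, pvSpecOff onsets offsets thr k)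
        = (pvSpecOn onsets offsets thr 0, pvSpecOff onsets offsets thr 0) := by
  intro k
  induction k with
  | zero => intro _; rfl
  | succ k ih =>
      intro hk
      have hm : k + 2 ≤ offsets.length := by omega
      simp only [pvLoopA]
      by_cases hc : PySem.List.pyGetD onsets ((k : Int) + 1) 0 - PySem.List.pyGetD offsets (k : Int) 0 ≤ thr
      · rw [if_pos hc]
        rw [pvSpecOn_del onsets offsets thr k hm hlen hc, pvSpecOff_del onsets offsets thr k hm hc]
        exact ih (by omega)
      · rw [if_neg hc,
            pvSpecOn_skip onsets offsets thr k hm hlen hc, pvSpecOff_skip onsets offsets thr k hm hc]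
        exact ih (by omega)

lemma pvSpecOn_top (onsets offsets : List Int) (thr : Int)
    (h1 : 1 ≤ offsets.length) (hlen : offsets.length ≤ onsets.length) :
    pvSpecOn onsets offsets thr (offsets.length - 1) = onsets := by
  unfold pvSpecOn
  have hm : offsets.length - 1 + 1 = offsets.length := by omega
  rw [hm, pvEnum_drop onsets offsets.length hlen]
  rw [pvFilterMap_keep_all]
  · rw [PySem.List.map_snd_enumerate, List.take_append_drop]
  · intro p hp
    rcases (PySem.List.mem_enumerate_iff _ _ _).1 hp with ⟨j, hj, rfl⟩
    unfold pvFOn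
    rw [if_neg]
    rintro ⟨_, h2, _⟩
    simp only at h2
    omega

lemma pvSpecOff_top (onsets offsets : List Int) (thr : Int)
    (h1 : 1 ≤ offsets.length) :
    pvSpecOff onsets offsets thr (offsets.length - 1) = offsets := by
  unfold pvSpecOff
  rw [pvEnum_drop offsets (offsets.length - 1) (by omega)]
  rw [pvFilterMap_keep_all]
  · rw [PySem.List.map_snd_enumerate, List.take_append_drop]
  · intro p hp
    rcases (PySem.List.mem_enumerate_iff _ _ _).1 hp with ⟨j, hj, rfl⟩
    unfold pvFOff
    rw [if_neg]
    rintro ⟨h2, _⟩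
    simp only at h2
    omega

lemma pvSpecOn_zero (onsets offsets : List Int) (thr : Int) (h : 0 < onsets.length) :
    pvSpecOn onsets offsets thr 0
      = (PySem.List.enumerate onsets 0).filterMap (pvFOn (offsets.length : Int) (pvShort onsets offsets thr)) := by
  unfold pvSpecOn
  have h0 : (PySem.List.enumerate onsets 0) = ((0 : Int), onsets[0]) :: (PySem.List.enumerate onsets 0).drop 1 := by
    have := pvEnum_drop_cons onsets 0 h
    simpa using this
  conv_rhs => rw [h0]
  rw [List.filterMap_cons]
  have hf : pvFOn (offsets.length : Int) (pvShort onsets offsets thr) ((0 : Int), onsets[0]) = some onsets[0] := by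
    unfold pvFOn
    rw [if_neg]
    rintro ⟨h1, _, _⟩
    omega
  rw [hf]
  have ht : onsets.take 1 = [onsets[0]] := by
    rw [show (1 : Nat) = 0 + 1 from rfl, List.take_add_one, List.getElem?_eq_getElem h]; rfl
  rw [ht]
  rfl

lemma pvSpecOff_zero (onsets offsets : List Int) (thr : Int) :
    pvSpecOff onsets offsets thr 0
      = (PySem.List.enumerate offsets 0).filterMap (pvFOff (offsets.length : Int) (pvShort onsets offsets thr)) := by
  unfold pvSpecOff
  rfl

-- ===== VERDICT (by name: the statement is the Claim_ definition above) =====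
theorem take_out_short_off_onset_spec : Claim_equal_take_out_short_off_onset := by
  intro onsets offsets mtp sf _ hpre
  unfold Pre_take_out_short_off_onset at hpre
  unfold Spec_take_out_short_off_onset take_out_short_off_onset take_out_short_off_onset_alt
  show pvLoopA onsets offsets (mtp * sf) (offsets.length - 1) (onsets, offsets)
      = ((PySem.List.enumerate onsets 0).filterMap (pvFOn (offsets.length : Int) (pvShort onsets offsets (mtp * sf))),
         (PySem.List.enumerate offsets 0).filterMap (pvFOff (offsets.length : Int) (pvShort onsets offsets (mtp * sf))))
  by_cases h1 : offsets.length ≤ 1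
  · have hf0 : offsets.length - 1 = 0 := by omega
    rw [hf0]
    have hshort : pvShort onsets offsets (mtp * sf) = [] := by
      unfold pvShort
      rcases Nat.le_one_iff_eq_zero_or_eq_one.1 h1 with h | h <;> rw [h] <;> norm_num
    rw [hshort]
    have hON : (PySem.List.enumerate onsets 0).filterMap (pvFOn (offsets.length : Int) []) = onsets := by
      apply pvFilterMap_enum_snd
      intro p _
      unfold pvFOn
      rw [if_neg]
      rintro ⟨_, _, h3⟩
      simp [PySem.List.pyGetD, PySem.List.pyGet?, PySem.List.pyIdx?] at h3
    have hOFF : (PySem.List.enumerate offsets 0).filterMap (pvFOff (offsets.length : Int) []) = offsets := by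
      apply pvFilterMap_enum_snd
      intro p _
      unfold pvFOff
      rw [if_neg]
      rintro ⟨_, h3⟩
      simp [PySem.List.pyGetD, PySem.List.pyGet?, PySem.List.pyIdx?] at h3
    rw [hON, hOFF]
    rfl
  · have hlen : offsets.length ≤ onsets.length := hpre.resolve_left h1
    have key := pvLoopA_inv onsets offsets (mtp * sf) hlen (offsets.length - 1) (by omega)
    rw [pvSpecOn_top onsets offsets (mtp * sf) (by omega) hlen,
        pvSpecOff_top onsets offsets (mtp * sf) (by omega),
        pvSpecOn_zero onsets offsets (mtp * sf) (by omega),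
        pvSpecOff_zero onsets offsets (mtp * sf)] at key
    exact key
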